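-- pv_equiv track=rewrite | github.com/faheelsattar/Competetive-programming | limakweight.py | yearCalc
-- ===== SOURCE A (Python) =====
-- def yearCalc(a, b, count):
--     counter = count
--     if a > b:
--         return counter
--     else:
--         a=a*3
--         b=b*2
--         counter=counter+1
--         return yearCalc(a,b, counter)
-- ===== SOURCE B (Python) =====
-- def yearCalc(a, b, count):
--     # Binary search for the least n with a*3**n > b*2**n (monotone once a > 0),
--     # instead of stepping the two running products one year at a time.
--     if a > b:
--         return count
--     hi = 1
--     while a * 3**hi <= b * 2**hi:
--         hi *= 2
--     lo = 0
--     while hi - lo > 1: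
--         mid = (lo + hi) // 2
--         if a * 3**mid > b * 2**mid:
--             hi = mid
--         else:
--             lo = mid
--     return count + hi
-- ===== Notes on version B (the rewrite author's own statement) =====
-- stated objective: alternative
-- what changed: Replaces A's one-step-per-year tail recursion (multiplying a by 3 and b by 2 each call) with an exponential-doubling upper bound plus binary search for the least n with a*3**n > b*2**n, returning count + n.
import Mathlib
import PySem

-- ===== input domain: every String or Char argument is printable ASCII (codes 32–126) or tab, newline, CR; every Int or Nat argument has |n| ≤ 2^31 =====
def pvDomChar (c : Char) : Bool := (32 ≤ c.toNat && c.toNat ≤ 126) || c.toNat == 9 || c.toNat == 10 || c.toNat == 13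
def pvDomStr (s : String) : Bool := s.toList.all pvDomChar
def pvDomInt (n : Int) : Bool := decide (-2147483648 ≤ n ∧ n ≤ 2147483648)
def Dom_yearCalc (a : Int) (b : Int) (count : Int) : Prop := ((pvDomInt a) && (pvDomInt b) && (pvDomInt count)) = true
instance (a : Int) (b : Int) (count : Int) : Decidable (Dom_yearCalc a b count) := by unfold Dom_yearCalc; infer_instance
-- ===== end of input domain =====

-- B replaces A's one-step-per-year tail recursion by a doubling + binary search for the
-- least n with a*3^n > b*2^n (alternative algorithm, same exact results).


-- ===== PORT A =====
-- A's tail recursion, with a fuel counter as a pure totality guard (200 steps suffice on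
-- every input admitted by Dom ∧ Pre; elsewhere the Python recursion never returns).
def yearCalcGo (fuel : Nat) (a : Int) (b : Int) (counter : Int) : Int :=
  match fuel with
  | 0 => counter
  | f + 1 =>
    if a > b then counter
    else yearCalcGo f (a * 3) (b * 2) (counter + 1)

def yearCalc (a : Int) (b : Int) (count : Int) : Int :=
  yearCalcGo 200 a b count

-- ===== PORT B =====
-- B's two while-loops, each with a fuel counter as a totality guard (64/128 iterations
-- suffice on every input admitted by Dom ∧ Pre; elsewhere the Python loop never exits).
-- The nonnegative Python loop variables hi/lo/mid are carried as Nat (exact: they start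
-- nonnegative and only grow / average).
def growHi (fuel : Nat) (a : Int) (b : Int) (hi : Nat) : Nat :=
  match fuel with
  | 0 => hi
  | f + 1 =>
    if a * 3 ^ hi ≤ b * 2 ^ hi then growHi f a b (hi * 2) else hi

def bisect (fuel : Nat) (a : Int) (b : Int) (lo : Nat) (hi : Nat) : Nat :=
  match fuel with
  | 0 => hi
  | f + 1 =>
    if hi - lo > 1 then
      let mid := (lo + hi) / 2
      if a * 3 ^ mid > b * 2 ^ mid then bisect f a b lo mid
      else bisect f a b mid hi
    else hi

def yearCalc_alt (a : Int) (b : Int) (count : Int) : Int :=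
  if a > b then count
  else
    let hi := growHi 64 a b 1
    count + (bisect 128 a b 0 hi : Int)

-- ===== PRECONDITION & SPEC =====
-- Pre_ excludes exactly the inputs (a ≤ b and a ≤ 0) on which A recurses forever and
-- raises RecursionError (B's loop also never exits there).
def Pre_yearCalc (a : Int) (b : Int) (count : Int) : Prop := a > b ∨ 0 < a
instance (a : Int) (b : Int) (count : Int) : Decidable (Pre_yearCalc a b count) := by
  unfold Pre_yearCalc; infer_instance

def pvWitness_yearCalc : Int × Int × Int := (2, 100, 0)

def Spec_yearCalc (a : Int) (b : Int) (count : Int) (out : Int) : Prop := out = yearCalc_alt a b count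
instance (a : Int) (b : Int) (count : Int) (out : Int) : Decidable (Spec_yearCalc a b count out) := by unfold Spec_yearCalc; infer_instance

-- ===== CLAIM (what is proved, stated in full; the proofs are below) =====
def Claim_equal_yearCalc : Prop := ∀ (a : Int) (b : Int) (count : Int), Dom_yearCalc a b count → Pre_yearCalc a b count → Spec_yearCalc a b count (yearCalc a b count)

-- ===== LEMMAS AND PROOFS =====

-- P a b n: after n years the first product has overtaken the second.
def Phit (a b : Int) (n : Nat) : Prop := b * 2 ^ n < a * 3 ^ n

lemma Phit_mono (a b : Int) (ha : 0 < a) {m k : Nat} (hmk : m ≤ k) (h : Phit a b m) :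
    Phit a b k := by
  induction k with
  | zero => exact (Nat.le_zero.mp hmk) ▸ h
  | succ k ih =>
    rcases Nat.lt_or_ge m (k+1) with hlt | hge
    · have hk : Phit a b k := ih (Nat.lt_succ_iff.mp hlt)
      unfold Phit at hk ⊢
      have hpos : 0 < a * 3 ^ k := mul_pos ha (by positivity)
      have : b * 2 ^ k < a * 3 ^ k := hk
      calc b * 2 ^ (k+1) = 2 * (b * 2 ^ k) := by ring
        _ < 2 * (a * 3 ^ k) := by omega
        _ < 3 * (a * 3 ^ k) := by omega
        _ = a * 3 ^ (k+1) := by ring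
    · have : m = k + 1 := le_antisymm hmk hge
      exact this ▸ h

lemma Phit_shift (a b : Int) (m : Nat) : Phit (a*3) (b*2) m ↔ Phit a b (m+1) := by
  unfold Phit
  rw [pow_succ, pow_succ]
  constructor <;> intro h <;> nlinarith [h]

-- A computes count + n when n is the least hitting time and fuel suffices.
lemma yearCalcGo_eq (n : Nat) : ∀ (fuel : Nat) (a b count : Int),
    Phit a b n → (∀ m, m < n → ¬ Phit a b m) → n ≤ fuel →
    yearCalcGo fuel a b count = count + n := by
  induction n with
  | zero =>
    intro fuel a b count hP _ _
    have hab : a > b := by simpa [Phit] using hP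
    cases fuel with
    | zero => simp [yearCalcGo]
    | succ f => simp [yearCalcGo, hab]
  | succ k ih =>
    intro fuel a b count hP hmin hle
    cases fuel with
    | zero => omega
    | succ f =>
      have h0 : ¬ Phit a b 0 := hmin 0 (Nat.succ_pos k)
      have hab : ¬ a > b := by simpa [Phit] using h0
      have hP' : Phit (a*3) (b*2) k := (Phit_shift a b k).mpr hP
      have hmin' : ∀ m, m < k → ¬ Phit (a*3) (b*2) m := fun m hm h =>
        hmin (m+1) (by omega) ((Phit_shift a b m).mp h)
      have := ih f (a*3) (b*2) (count+1) hP' hmin' (by omega)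
      simp only [yearCalcGo, hab, if_false]
      rw [this]; push_cast; ring

lemma growHi_correct (a b : Int) : ∀ (fuel hi : Nat),
    0 < hi → Phit a b (hi * 2 ^ fuel) →
    0 < growHi fuel a b hi ∧ growHi fuel a b hi ≤ hi * 2 ^ fuel ∧
      Phit a b (growHi fuel a b hi) := by
  intro fuel
  induction fuel with
  | zero =>
    intro hi hpos hP
    simpa [growHi] using ⟨hpos, by simpa using hP⟩
  | succ f ih =>
    intro hi hpos hP
    by_cases hc : a * 3 ^ hi ≤ b * 2 ^ hi
    · have hP' : Phit a b (hi * 2 * 2 ^ f) := by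
        have : hi * 2 * 2 ^ f = hi * 2 ^ (f+1) := by ring
        rw [this]; exact hP
      have := ih (hi * 2) (by omega) hP'
      simp only [growHi, hc, if_true]
      refine ⟨this.1, ?_, this.2.2⟩
      calc growHi f a b (hi*2) ≤ hi * 2 * 2 ^ f := this.2.1
        _ = hi * 2 ^ (f+1) := by ring
    · have hPhi : Phit a b hi := lt_of_not_ge hc
      simp only [growHi, hc, if_false]
      exact ⟨hpos, Nat.le_mul_of_pos_right hi (by positivity), hPhi⟩

lemma bisect_eq (a b : Int) (ha : 0 < a) (n : Nat)
    (hPn : Phit a b n) (hmin : ∀ m, m < n → ¬ Phit a b m) :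
    ∀ (fuel lo hi : Nat), ¬ Phit a b lo → Phit a b hi → hi - lo ≤ 2 ^ fuel →
    bisect fuel a b lo hi = n := by
  have key : ∀ lo hi : Nat, ¬ Phit a b lo → Phit a b hi → hi - lo ≤ 1 → hi = n := by
    intro lo hi hlo hhi hd
    have hlthi : lo < hi := by
      by_contra h
      exact hlo (Phit_mono a b ha (by omega) hhi)
    have h1 : hi = lo + 1 := by omega
    have hn_le : n ≤ hi := by
      by_contra h
      exact hmin hi (by omega) hhi
    have hlo_lt : lo < n := by
      by_contra h
      exact hlo (Phit_mono a b ha (by omega) hPn)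
    omega
  intro fuel
  induction fuel with
  | zero =>
    intro lo hi hlo hhi hd
    simpa [bisect] using key lo hi hlo hhi (by simpa using hd)
  | succ f ih =>
    intro lo hi hlo hhi hd
    by_cases hgt : hi - lo > 1
    · have hlthi : lo < hi := by omega
      set mid := (lo + hi) / 2 with hmid
      have hmb : 2 * mid ≤ lo + hi ∧ lo + hi ≤ 2 * mid + 1 := by
        constructor <;> omega
      have hlomid : lo < mid := by omega
      have hmidhi : mid < hi := by omega
      have h2f : (1:Nat) ≤ 2 ^ f := Nat.one_le_two_pow
      by_cases hc : a * 3 ^ mid > b * 2 ^ mid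
      · have : bisect (f+1) a b lo hi = bisect f a b lo mid := by
          simp [bisect, hgt, ← hmid, hc]
        rw [this]
        exact ih lo mid hlo hc (by simp [pow_succ] at hd ⊢; omega)
      · have hcm : ¬ Phit a b mid := by simpa [Phit] using hc
        have : bisect (f+1) a b lo hi = bisect f a b mid hi := by
          simp [bisect, hgt, ← hmid] at hc ⊢
          simp [not_lt.mpr hc]
        rw [this]
        exact ih mid hi hcm hhi (by simp [pow_succ] at hd ⊢; omega)
    · simp only [bisect, hgt, if_false]
      exact key lo hi hlo hhi (by omega)

lemma Phit_54 (a b : Int) (ha : 0 < a) (hb : b ≤ 2147483648) : Phit a b 54 := by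
  unfold Phit
  have h1 : a * 3 ^ 54 ≥ 1 * 3 ^ 54 := by
    apply mul_le_mul_of_nonneg_right (by omega) (by positivity)
  have h2 : b * 2 ^ 54 ≤ 2147483648 * 2 ^ 54 := by
    apply mul_le_mul_of_nonneg_right hb (by positivity)
  nlinarith [h1, h2]

-- ===== VERDICT (by name: the statement is the Claim_ definition above) =====
theorem yearCalc_spec : Claim_equal_yearCalc := by
  intro a b count hDom hPre
  unfold Spec_yearCalc yearCalc yearCalc_alt
  by_cases hab : a > b
  · simp [yearCalcGo, hab]
  · have ha : 0 < a := hPre.resolve_left hab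
    have hble : b ≤ 2147483648 := by
      unfold Dom_yearCalc pvDomInt at hDom
      simp only [Bool.and_eq_true, decide_eq_true_eq] at hDom
      exact hDom.1.2.2
    have h54 : Phit a b 54 := Phit_54 a b ha hble
    have hex : ∃ n : Nat, b * 2 ^ n < a * 3 ^ n := ⟨54, h54⟩
    set n := Nat.find hex with hn
    have hPn : Phit a b n := Nat.find_spec hex
    have hmin : ∀ m, m < n → ¬ Phit a b m := fun m hm => Nat.find_min hex hm
    have hn54 : n ≤ 54 := Nat.find_le h54
    have hA : yearCalcGo 200 a b count = count + n :=
      yearCalcGo_eq n 200 a b count hPn hmin (by omega)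
    have hP64 : Phit a b (1 * 2 ^ 64) := Phit_mono a b ha (by norm_num) h54
    obtain ⟨hg0, hgle, hgP⟩ := growHi_correct a b 64 1 (by omega) hP64
    have h0 : ¬ Phit a b 0 := by simpa [Phit] using hab
    have hB : bisect 128 a b 0 (growHi 64 a b 1) = n := by
      apply bisect_eq a b ha n hPn hmin 128 0 _ h0 hgP
      calc growHi 64 a b 1 - 0 ≤ 1 * 2 ^ 64 := by omega
        _ ≤ 2 ^ 128 := by norm_num
    simp only [hab, if_false, hA, hB]
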